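-- pv_equiv track=rewrite | github.com/umraiz-ai/March_18_latest_training_compilation_running_successfully | TACHY-Compiler/compiler/src/editor.py | _get_step_list_with_channel
-- ===== SOURCE A (Python) =====
-- def _get_step_list_with_channel(step, n_ch, i_ch, base=0) -> list:
--     result = []
--     n_iter = n_ch // step
--     n_extra = True if n_ch % step > 0 else False
--     result = [(i*step+base, (i+1)*step+base, i_ch) for i in range(n_iter)]
--     if n_extra:
--         n_base = n_iter * step + base
--         result.append((n_base, n_ch + base, i_ch))
--
--     return result
-- ===== SOURCE B (Python) =====
-- def _get_step_list_with_channel(step, n_ch, i_ch, base=0) -> list: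
--     n_iter, rem = divmod(n_ch, step)
--     bounds = [base + i * step for i in range(n_iter)]
--     bounds.append(n_iter * step + base)
--     if rem > 0:
--         bounds.append(n_ch + base)
--     return [(lo, hi, i_ch) for lo, hi in zip(bounds, bounds[1:])]
-- ===== Notes on version B (the rewrite author's own statement) =====
-- stated objective: alternative
-- what changed: B builds the list of interval boundaries once (a divmod, a boundary table, plus the final edge and the optional remainder edge) and then pairs consecutive boundaries with zip, instead of A's per-index i*step arithmetic producing each tuple directly.
-- outside the precondition, e.g. on _get_step_list_with_channel(0, 4, 1, 0): A raises ZeroDivisionError, B raises ZeroDivisionError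
import Mathlib
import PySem

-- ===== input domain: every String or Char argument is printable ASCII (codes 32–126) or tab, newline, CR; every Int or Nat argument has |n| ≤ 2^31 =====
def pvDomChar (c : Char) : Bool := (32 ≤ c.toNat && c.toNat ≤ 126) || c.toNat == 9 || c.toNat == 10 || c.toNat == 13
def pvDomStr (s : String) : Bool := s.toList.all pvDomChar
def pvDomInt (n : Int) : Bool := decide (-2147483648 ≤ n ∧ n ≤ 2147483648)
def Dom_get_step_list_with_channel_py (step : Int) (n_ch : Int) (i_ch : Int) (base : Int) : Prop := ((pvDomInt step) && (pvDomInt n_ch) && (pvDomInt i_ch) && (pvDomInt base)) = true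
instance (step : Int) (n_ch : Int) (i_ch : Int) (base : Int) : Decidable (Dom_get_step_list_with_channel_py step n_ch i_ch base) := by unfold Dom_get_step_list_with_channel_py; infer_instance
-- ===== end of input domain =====

-- B builds the boundary table once and pairs consecutive boundaries; alternative decomposition, same cost.
-- Equivalence of RETURN values on step ≠ 0 (both programs raise ZeroDivisionError at step = 0).

-- ===== PORT A =====
def get_step_list_with_channel_py (step : Int) (n_ch : Int) (i_ch : Int) (base : Int) : List (Int × Int × Int) :=
  let n_iter := PySem.Int.floordiv n_ch step
  let n_extra := if PySem.Int.mod n_ch step > 0 then true else false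
  let result := (PySem.List.pyRange 0 n_iter 1).map (fun i => (i * step + base, (i + 1) * step + base, i_ch))
  if n_extra then result ++ [(n_iter * step + base, n_ch + base, i_ch)] else result

-- ===== PORT B =====
-- zip(bounds, bounds[1:]) is bounds.zip bounds.tail (exact: bounds[1:] drops the first element)
def get_step_list_with_channel_py_alt (step : Int) (n_ch : Int) (i_ch : Int) (base : Int) : List (Int × Int × Int) :=
  let n_iter := PySem.Int.floordiv n_ch step
  let rem := PySem.Int.mod n_ch step
  let bounds0 := (PySem.List.pyRange 0 n_iter 1).map (fun i => base + i * step) ++ [n_iter * step + base]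
  let bounds := if rem > 0 then bounds0 ++ [n_ch + base] else bounds0
  (bounds.zip bounds.tail).map (fun p => (p.1, p.2, i_ch))

-- ===== PRECONDITION & SPEC =====
-- Pre_ excludes step = 0, on which both Pythons raise ZeroDivisionError.
def Pre_get_step_list_with_channel_py (step : Int) (n_ch : Int) (i_ch : Int) (base : Int) : Prop := step ≠ 0
instance (step : Int) (n_ch : Int) (i_ch : Int) (base : Int) : Decidable (Pre_get_step_list_with_channel_py step n_ch i_ch base) := by unfold Pre_get_step_list_with_channel_py; infer_instance
def pvWitness_get_step_list_with_channel_py : Int × Int × Int × Int := (2, 5, 1, 10)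

def Spec_get_step_list_with_channel_py (step : Int) (n_ch : Int) (i_ch : Int) (base : Int) (out : List (Int × Int × Int)) : Prop := out = get_step_list_with_channel_py_alt step n_ch i_ch base
instance (step : Int) (n_ch : Int) (i_ch : Int) (base : Int) (out : List (Int × Int × Int)) : Decidable (Spec_get_step_list_with_channel_py step n_ch i_ch base out) := by unfold Spec_get_step_list_with_channel_py; infer_instance

-- ===== CLAIM (what is proved, stated in full; the proofs are below) =====
def Claim_equal_get_step_list_with_channel_py : Prop := ∀ (step : Int) (n_ch : Int) (i_ch : Int) (base : Int), Dom_get_step_list_with_channel_py step n_ch i_ch base → Pre_get_step_list_with_channel_py step n_ch i_ch base → Spec_get_step_list_with_channel_py step n_ch i_ch base (get_step_list_with_channel_py step n_ch i_ch base)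

-- ===== LEMMAS AND PROOFS =====

-- consecutive-pair zip splits at any interior element
theorem zc_split {α : Type} (l : List α) (y : α) (s : List α) :
    ((l ++ y :: s).zip (l ++ y :: s).tail) = ((l ++ [y]).zip (l ++ [y]).tail) ++ ((y :: s).zip s) := by
  induction l with
  | nil => simp
  | cons x l' IH =>
    cases l' with
    | nil => simp
    | cons z l'' =>
      simpa using congrArg (List.cons (x, z)) IH

-- pairing consecutive elements of a boundary table generated from range
theorem zc_range_map {α : Type} (G : Nat → α) :
    ∀ n : Nat, (((List.range n).map G ++ [G n]).zip ((List.range n).map G ++ [G n]).tail)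
      = (List.range n).map (fun k => (G k, G (k + 1))) := by
  intro n
  induction n with
  | zero => simp
  | succ m IH =>
    have h := zc_split ((List.range m).map G) (G m) [G (m + 1)]
    simp only [List.range_succ, List.map_append, List.map_cons, List.map_nil,
      List.append_assoc, List.cons_append, List.nil_append] at h ⊢
    rw [h, IH]
    simp

theorem get_step_list_with_channel_py_spec : Claim_equal_get_step_list_with_channel_py := by
  intro step n_ch i_ch base _ hs
  unfold Spec_get_step_list_with_channel_py get_step_list_with_channel_py get_step_list_with_channel_py_alt
  simp only []
  set nd := PySem.Int.floordiv n_ch step with hnd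
  set rem := PySem.Int.mod n_ch step with hrem
  by_cases hpos : 0 < nd
  · -- nd > 0 : the range is (List.range nd.toNat).map (↑·)
    obtain ⟨m, hm⟩ : ∃ m : Nat, nd = (m : Int) := ⟨nd.toNat, by omega⟩
    have hr : PySem.List.pyRange 0 nd 1 = List.map (fun k : Nat => (k : Int)) (List.range m) := by
      rw [hm]; exact PySem.List.pyRange_zero_natCast m
    set G : Nat → Int := fun k => base + (k : Int) * step with hG
    have hGm : nd * step + base = G m := by rw [hm, hG]; ring
    have hb0 : ((PySem.List.pyRange 0 nd 1).map (fun i => base + i * step) ++ [nd * step + base])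
        = List.map G (List.range m) ++ [G m] := by
      rw [hr, hGm, List.map_map]; rfl
    have hA : (PySem.List.pyRange 0 nd 1).map (fun i => (i * step + base, (i + 1) * step + base, i_ch))
        = List.map (fun k : Nat => (G k, G (k + 1), i_ch)) (List.range m) := by
      rw [hr, List.map_map]
      refine List.map_congr_left ?_
      intro k _
      simp only [Function.comp, hG, Prod.mk.injEq]
      push_cast
      exact ⟨by ring, by ring, trivial⟩
    by_cases hrp : 0 < rem
    · simp only [hrp, if_pos]
      rw [hb0]
      have h := zc_split ((List.range m).map G) (G m) [n_ch + base]
      simp only [List.append_assoc, List.cons_append, List.nil_append] at h ⊢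
      rw [h, zc_range_map G m, hA]
      simp [List.map_map, Function.comp, hGm]
    · simp only [gt_iff_lt, hrp, if_false]
      rw [hb0, zc_range_map G m, hA, List.map_map]
      rfl
  · -- nd ≤ 0 : the range is empty
    have hr : PySem.List.pyRange 0 nd 1 = [] := PySem.List.pyRange_one_eq_nil (by omega)
    by_cases hrp : 0 < rem
    · simp [hr, hrp]
    · simp [hr, hrp]

-- ===== VERDICT (by name: the statement is the Claim_ definition above) =====
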